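-- pv_equiv track=rewrite | github.com/columbia/turbo | turbo-lib/turbo/utilities/utils.py | get_flat_bin_index
-- ===== SOURCE A (Python) =====
-- from typing import List, Dict
--
-- def get_flat_bin_index(
--     multidim_bin_index: List[int], attribute_sizes: List[int]
-- ) -> int:
--     index = 0
--     size = 1
--     for dim in range(len(attribute_sizes) - 1, -1, -1):
--         index += multidim_bin_index[dim] * size
--         size *= attribute_sizes[dim]
--     return index
-- ===== SOURCE B (Python) =====
-- def get_flat_bin_index(multidim_bin_index, attribute_sizes):
--     # Horner's method, front-to-back: a single accumulator, no running size product.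
--     index = 0
--     for dim in range(len(attribute_sizes)):
--         index = index * attribute_sizes[dim] + multidim_bin_index[dim]
--     return index
-- ===== Notes on version B (the rewrite author's own statement) =====
-- stated objective: simpler
-- what changed: Replaces A's reverse-pass weighted sum with a separate running-size product by a forward Horner pass that keeps only one accumulator (index = index*size + digit).
import Mathlib
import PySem

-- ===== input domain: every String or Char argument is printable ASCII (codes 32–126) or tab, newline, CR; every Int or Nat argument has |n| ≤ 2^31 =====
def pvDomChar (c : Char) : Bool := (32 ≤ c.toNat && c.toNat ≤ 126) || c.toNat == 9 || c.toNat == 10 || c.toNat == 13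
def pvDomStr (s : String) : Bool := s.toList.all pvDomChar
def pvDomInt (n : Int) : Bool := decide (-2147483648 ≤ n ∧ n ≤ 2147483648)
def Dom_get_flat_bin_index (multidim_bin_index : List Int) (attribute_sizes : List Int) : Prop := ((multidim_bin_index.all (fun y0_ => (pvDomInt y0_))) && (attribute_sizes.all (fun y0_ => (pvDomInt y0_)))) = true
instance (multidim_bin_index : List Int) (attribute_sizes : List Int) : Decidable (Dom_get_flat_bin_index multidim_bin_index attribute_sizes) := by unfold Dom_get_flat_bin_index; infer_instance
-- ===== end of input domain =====

-- B: forward Horner pass with a single accumulator, instead of A's reverse pass with a running-size product (objective: simpler).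

-- ===== PORT A =====
-- index=0; size=1; for dim in range(len(attribute_sizes)-1,-1,-1): index += mbi[dim]*size; size *= sizes[dim]
def get_flat_bin_index (multidim_bin_index : List Int) (attribute_sizes : List Int) : Int :=
  ((PySem.List.pyRange ((attribute_sizes.length : Int) - 1) (-1) (-1)).foldl
    (fun (st : Int × Int) dim =>
      (st.1 + PySem.List.pyGetD multidim_bin_index dim 0 * st.2,
       st.2 * PySem.List.pyGetD attribute_sizes dim 0))
    (0, 1)).1

-- ===== PORT B =====
-- index=0; for dim in range(len(attribute_sizes)): index = index*sizes[dim] + mbi[dim]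
def get_flat_bin_index_alt (multidim_bin_index : List Int) (attribute_sizes : List Int) : Int :=
  (PySem.List.pyRange 0 (attribute_sizes.length : Int) 1).foldl
    (fun idx dim =>
      idx * PySem.List.pyGetD attribute_sizes dim 0 + PySem.List.pyGetD multidim_bin_index dim 0)
    0

-- ===== PRECONDITION & SPEC =====
-- Pre_ excludes exactly the inputs where both Pythons raise IndexError: fewer bin coordinates than dimensions.
def Pre_get_flat_bin_index (multidim_bin_index : List Int) (attribute_sizes : List Int) : Prop :=
  attribute_sizes.length ≤ multidim_bin_index.length
instance (multidim_bin_index : List Int) (attribute_sizes : List Int) : Decidable (Pre_get_flat_bin_index multidim_bin_index attribute_sizes) := by unfold Pre_get_flat_bin_index; infer_instance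
def pvWitness_get_flat_bin_index : List Int × List Int := ([1, 2, 3], [4, 5, 6])
def Spec_get_flat_bin_index (multidim_bin_index : List Int) (attribute_sizes : List Int) (out : Int) : Prop := out = get_flat_bin_index_alt multidim_bin_index attribute_sizes
instance (multidim_bin_index : List Int) (attribute_sizes : List Int) (out : Int) : Decidable (Spec_get_flat_bin_index multidim_bin_index attribute_sizes out) := by unfold Spec_get_flat_bin_index; infer_instance

-- ===== CLAIM (what is proved, stated in full; the proofs are below) =====
def Claim_equal_get_flat_bin_index : Prop := ∀ (multidim_bin_index : List Int) (attribute_sizes : List Int), Dom_get_flat_bin_index multidim_bin_index attribute_sizes → Pre_get_flat_bin_index multidim_bin_index attribute_sizes → Spec_get_flat_bin_index multidim_bin_index attribute_sizes (get_flat_bin_index multidim_bin_index attribute_sizes)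

-- ===== LEMMAS AND PROOFS =====

-- Horner value of the first n dimensions (what B computes) and the product of the first n sizes.
def pvHorner (multidim_bin_index : List Int) (attribute_sizes : List Int) : Nat → Int
  | 0 => 0
  | n + 1 => pvHorner multidim_bin_index attribute_sizes n * PySem.List.pyGetD attribute_sizes (n : Int) 0
              + PySem.List.pyGetD multidim_bin_index (n : Int) 0

def pvProd (attribute_sizes : List Int) : Nat → Int
  | 0 => 1
  | n + 1 => pvProd attribute_sizes n * PySem.List.pyGetD attribute_sizes (n : Int) 0

-- A's countdown loop from any accumulator pair (i, s).
theorem pvA_aux (mbi sizes : List Int) (n : Nat) (i s : Int) :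
    ((PySem.List.pyRange ((n : Int) - 1) (-1) (-1)).foldl
      (fun (st : Int × Int) dim =>
        (st.1 + PySem.List.pyGetD mbi dim 0 * st.2,
         st.2 * PySem.List.pyGetD sizes dim 0)) (i, s))
    = (i + s * pvHorner mbi sizes n, s * pvProd sizes n) := by
  induction n generalizing i s with
  | zero =>
      rw [PySem.List.pyRange_neg_one_eq_nil (by norm_num)]
      simp [pvHorner, pvProd]
  | succ n ih =>
      rw [show ((n + 1 : Nat) : Int) - 1 = (n : Int) by push_cast; ring,
          PySem.List.pyRange_neg_one_cons (by omega)]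
      simp only [List.foldl_cons]
      rw [ih]
      simp only [pvHorner, pvProd]
      simp only [Prod.mk.injEq]
      constructor <;> ring

-- B's forward loop computes the Horner value.
theorem pvB_aux (mbi sizes : List Int) (n : Nat) :
    (PySem.List.pyRange 0 (n : Int) 1).foldl
      (fun idx dim =>
        idx * PySem.List.pyGetD sizes dim 0 + PySem.List.pyGetD mbi dim 0) 0
    = pvHorner mbi sizes n := by
  induction n with
  | zero => simp [pvHorner]
  | succ n ih =>
      rw [show ((n + 1 : Nat) : Int) = (n : Int) + 1 by push_cast; ring,
          PySem.List.pyRange_one_succ_right (by omega)]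
      rw [List.foldl_append, ih]
      simp [pvHorner]

-- ===== VERDICT (by name: the statement is the Claim_ definition above) =====
theorem get_flat_bin_index_spec : Claim_equal_get_flat_bin_index := by
  intro mbi sizes _ _
  unfold Spec_get_flat_bin_index get_flat_bin_index get_flat_bin_index_alt
  rw [pvA_aux, pvB_aux]
  ring
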